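-- pv_equiv track=rewrite | github.com/OlimIsaac/Group-5-aws | sensore/tests.py | build_flat_frame
-- ===== SOURCE A (Python) =====
-- def build_flat_frame(base_value=1200):
--     values = []
--     for row in range(32):
--         for col in range(32):
--             value = base_value
--             if 11 <= col <= 20 and 12 <= row <= 24:
--                 value += 1200
--             values.append(min(4095, value))
--     return values
-- ===== SOURCE B (Python) =====
-- def build_flat_frame(base_value=1200):
--     # Fill the whole frame with the clamped base value, then patch the
--     # raised center rectangle in a second pass.
--     values = [min(4095, base_value)] * 1024
--     patched = min(4095, base_value + 1200)
--     for row in range(12, 25):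
--         for col in range(11, 21):
--             values[row * 32 + col] = patched
--     return values
-- ===== Notes on version B (the rewrite author's own statement) =====
-- stated objective: alternative
-- what changed: Replaces the single pass with a per-cell branch by a fill-then-patch decomposition: a flat fill of the whole frame with the clamped base value followed by a second pass that overwrites only the center rectangle via row-major index assignment.
import Mathlib
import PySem

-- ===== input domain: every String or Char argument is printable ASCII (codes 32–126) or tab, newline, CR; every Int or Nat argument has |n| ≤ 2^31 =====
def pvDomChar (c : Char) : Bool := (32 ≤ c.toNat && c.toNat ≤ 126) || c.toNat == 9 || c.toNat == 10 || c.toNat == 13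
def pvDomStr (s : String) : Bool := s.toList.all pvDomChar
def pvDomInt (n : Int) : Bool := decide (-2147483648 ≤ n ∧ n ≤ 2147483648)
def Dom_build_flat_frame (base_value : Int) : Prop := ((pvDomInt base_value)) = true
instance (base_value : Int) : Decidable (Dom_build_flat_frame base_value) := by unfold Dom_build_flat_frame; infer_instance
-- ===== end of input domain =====

-- B replaces the per-cell branch by a fill-then-patch decomposition (alternative, same cost).


-- ===== PORT A =====
def build_flat_frame (base_value : Int) : List Int :=
  (PySem.List.pyRange 0 32 1).foldl (fun values row =>
    (PySem.List.pyRange 0 32 1).foldl (fun values col =>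
      let value := base_value
      let value := if 11 ≤ col ∧ col ≤ 20 ∧ 12 ≤ row ∧ row ≤ 24 then value + 1200 else value
      values ++ [min 4095 value]) values) []

-- ===== PORT B =====
-- Source B: fill the whole 1024-cell frame with the clamped base value, then patch the
-- center rectangle.  'values[row*32+col] = patched': the index is nonnegative and in
-- range for every (row, col) of these ranges, so List.set with .toNat is exact here.
def build_flat_frame_alt (base_value : Int) : List Int :=
  let patched := min 4095 (base_value + 1200)
  (PySem.List.pyRange 12 25 1).foldl (fun values row =>
    (PySem.List.pyRange 11 21 1).foldl (fun values col =>
      values.set (row * 32 + col).toNat patched) values)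
    (List.replicate 1024 (min 4095 base_value))

-- ===== PRECONDITION & SPEC =====
def Spec_build_flat_frame (base_value : Int) (out : List Int) : Prop := out = build_flat_frame_alt base_value
instance (base_value : Int) (out : List Int) : Decidable (Spec_build_flat_frame base_value out) := by unfold Spec_build_flat_frame; infer_instance

-- ===== CLAIM (what is proved, stated in full; the proofs are below) =====
def Claim_equal_build_flat_frame : Prop := ∀ (base_value : Int), Dom_build_flat_frame base_value → Spec_build_flat_frame base_value (build_flat_frame base_value)

-- ===== LEMMAS AND PROOFS =====

-- The common closed form: cell i holds y inside the raised rectangle, x outside.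
def pvGrid (x y : Int) : List Int :=
  (List.range 1024).map (fun i =>
    if 11 ≤ i % 32 ∧ i % 32 ≤ 20 ∧ 12 ≤ i / 32 ∧ i / 32 ≤ 24 then y else x)

-- row-major flattening of an n×m grid of F values
lemma flatMap_range_eq (F : Nat → Nat → Int) (n m : Nat) (hm : 0 < m) :
    (List.range n).flatMap (fun r => (List.range m).map (F r)) =
      (List.range (n * m)).map (fun i => F (i / m) (i % m)) := by
  induction n with
  | zero => simp
  | succ n ih =>
      have h1 : (n + 1) * m = n * m + m := by ring
      rw [List.range_succ, List.flatMap_append, ih, h1, List.range_add,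
        List.map_append, List.map_map, List.flatMap_singleton]
      congr 1
      apply List.map_congr_left
      intro c hc
      have hc' : c < m := List.mem_range.mp hc
      have hd : (n * m + c) / m = n := by
        rw [Nat.mul_comm n m, Nat.mul_add_div hm, Nat.div_eq_of_lt hc']; omega
      have hmod : (n * m + c) % m = c := by
        rw [Nat.mul_comm n m, Nat.mul_add_mod]; exact Nat.mod_eq_of_lt hc'
      simp [hd, hmod]

lemma A_eq_grid (b : Int) :
    build_flat_frame b = pvGrid (min 4095 b) (min 4095 (b + 1200)) := by
  unfold build_flat_frame pvGrid
  simp only [PySem.List.foldl_append_singleton_eq_map, PySem.List.foldl_append_eq_flatMap,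
    List.nil_append]
  have h32 : (32 : Int) = ((32 : Nat) : Int) := by norm_num
  rw [h32, PySem.List.pyRange_zero_nat, List.flatMap_map]
  have := flatMap_range_eq
    (fun r c => min 4095 (if 11 ≤ (c : Int) ∧ (c : Int) ≤ 20 ∧ 12 ≤ (r : Int) ∧ (r : Int) ≤ 24
      then b + 1200 else b)) 32 32 (by norm_num)
  simp only [List.map_map, Function.comp_def] at this ⊢
  rw [this]
  have h1024 : 32 * 32 = 1024 := by norm_num
  rw [h1024]
  apply List.map_congr_left
  intro i _
  have hiff : (11 ≤ ((i % 32 : Nat) : Int) ∧ ((i % 32 : Nat) : Int) ≤ 20 ∧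
      12 ≤ ((i / 32 : Nat) : Int) ∧ ((i / 32 : Nat) : Int) ≤ 24) ↔
      (11 ≤ i % 32 ∧ i % 32 ≤ 20 ∧ 12 ≤ i / 32 ∧ i / 32 ≤ 24) := by omega
  rw [apply_ite (min 4095)]
  exact if_congr hiff rfl rfl

-- folding `set · y` over a list of indices: length is preserved …
lemma length_foldl_set (idxs : List Nat) (l : List Int) (y : Int) :
    (idxs.foldl (fun vs i => vs.set i y) l).length = l.length := by
  induction idxs generalizing l with
  | nil => rfl
  | cons i t ih => simp [ih, List.length_set]

-- … and cell j ends up y exactly when j is one of the written indices.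
lemma getElem_foldl_set (idxs : List Nat) (l : List Int) (y : Int) (j : Nat)
    (hj : j < l.length) :
    (idxs.foldl (fun vs i => vs.set i y) l)[j]'(by rw [length_foldl_set]; exact hj) =
      if j ∈ idxs then y else l[j] := by
  induction idxs generalizing l with
  | nil => simp
  | cons i t ih =>
      simp only [List.foldl_cons, List.mem_cons]
      rw [ih (l.set i y) (by simpa using hj), List.getElem_set]
      by_cases hji : j ∈ t
      · simp [hji]
      · by_cases hij : j = i
        · simp [hij]
        · simp [hji, hij, eq_comm]

set_option maxRecDepth 4000 in
lemma B_eq_grid (b : Int) :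
    build_flat_frame_alt b = pvGrid (min 4095 b) (min 4095 (b + 1200)) := by
  unfold build_flat_frame_alt
  set y := min 4095 (b + 1200) with hy
  set x := min 4095 b with hx
  -- flatten the two nested loops into one fold over the 130 written indices
  set idxs : List Nat :=
    (PySem.List.pyRange 12 25 1).flatMap
      (fun row => (PySem.List.pyRange 11 21 1).map (fun col => (row * 32 + col).toNat)) with hidxs
  have hfold :
      (PySem.List.pyRange 12 25 1).foldl (fun values row =>
        (PySem.List.pyRange 11 21 1).foldl (fun values col =>
          values.set (row * 32 + col).toNat y) values)
        (List.replicate 1024 x) =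
      idxs.foldl (fun vs i => vs.set i y) (List.replicate 1024 x) := by
    rw [hidxs, List.foldl_flatMap]
    apply PySem.List.foldl_congr_mem
    intro acc r _
    rw [List.foldl_map]
  rw [hfold]
  have hmem : ∀ j : Nat, j < 1024 →
      (j ∈ idxs ↔ (11 ≤ j % 32 ∧ j % 32 ≤ 20 ∧ 12 ≤ j / 32 ∧ j / 32 ≤ 24)) := by
    intro j hj
    rw [hidxs]
    simp only [List.mem_flatMap, List.mem_map, PySem.List.mem_pyRange_one]
    constructor
    · rintro ⟨r, ⟨hr1, hr2⟩, c, ⟨hc1, hc2⟩, rfl⟩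
      omega
    · rintro ⟨h1, h2, h3, h4⟩
      exact ⟨(j / 32 : Nat), by omega, (j % 32 : Nat), by omega, by omega⟩
  apply List.ext_getElem
  · rw [length_foldl_set]; simp [pvGrid]
  · intro j hj _
    have hj' : j < 1024 := by
      have := hj; rwa [length_foldl_set, List.length_replicate] at this
    rw [getElem_foldl_set idxs _ y j (by simpa using hj')]
    simp only [pvGrid, List.getElem_map, List.getElem_range, List.getElem_replicate]
    rw [if_congr (hmem j hj') rfl rfl]

-- ===== VERDICT (by name: the statement is the Claim_ definition above) =====
theorem build_flat_frame_spec : Claim_equal_build_flat_frame := by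
  intro b _
  unfold Spec_build_flat_frame
  rw [A_eq_grid, B_eq_grid]
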